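-- pv_equiv track=rewrite | github.com/Tyape-Kto/Math_one | poly_factor.py | e_factor
-- ===== SOURCE A (Python) =====
-- def e_factor(f:int, ex:list):
--   """
--   this takes factor and coeff of try if it gives zero
--     or not
--   """
--   result = 0
--   quotient = []
--   for i in range(len(ex)):
--     if i == 0:
--       result += ex[i] * f
--       quotient.append(ex[i])
--     else:
--       result += ex[i]
--       quotient.append(result)
--       result = result * f
--   if result == 0:
--     return f, quotient
--   else:
--     return None
-- ===== SOURCE B (Python) =====
-- def e_factor(f: int, ex: list):
--     """
--     this takes factor and coeff of try if it gives zero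
--       or not
--     """
--     quotient = [sum(ex[j] * f ** (k - j) for j in range(k + 1)) for k in range(len(ex))]
--     result = quotient[-1] * f if quotient else 0
--     if result == 0:
--         return f, quotient
--     return None
-- ===== Notes on version B (the rewrite author's own statement) =====
-- stated objective: alternative
-- what changed: Replaces A's single accumulating Horner pass (running remainder threaded through the loop) with an independent closed-form power sum b_k = sum(ex[j]*f**(k-j)) per quotient coefficient, and derives the final test value from the last coefficient instead of loop state.
import Mathlib
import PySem

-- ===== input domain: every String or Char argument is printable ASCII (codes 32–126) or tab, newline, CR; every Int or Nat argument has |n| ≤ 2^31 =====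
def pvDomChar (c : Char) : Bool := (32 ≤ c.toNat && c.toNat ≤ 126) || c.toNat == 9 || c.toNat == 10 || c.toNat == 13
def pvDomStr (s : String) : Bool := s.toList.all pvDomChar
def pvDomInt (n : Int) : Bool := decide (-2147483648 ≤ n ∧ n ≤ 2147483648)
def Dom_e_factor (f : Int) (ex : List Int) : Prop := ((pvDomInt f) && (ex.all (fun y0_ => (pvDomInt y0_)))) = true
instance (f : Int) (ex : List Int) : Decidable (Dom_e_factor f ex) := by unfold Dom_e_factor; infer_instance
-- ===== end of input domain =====

-- B replaces A's single accumulating Horner pass by an independent closed-form power sum per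
-- quotient coefficient (alternative decomposition, not faster); return values agree everywhere.

-- ===== PORT A =====
-- loop body of A: state (result, quotient), one step per index i of range(len(ex))
def pvStepA (f : Int) (ex : List Int) (s : Int × List Int) (i : Nat) : Int × List Int :=
  if i = 0 then
    (s.1 + PySem.List.pyGetD ex (i : Int) 0 * f, s.2 ++ [PySem.List.pyGetD ex (i : Int) 0])
  else
    let r := s.1 + PySem.List.pyGetD ex (i : Int) 0
    (r * f, s.2 ++ [r])

-- final 'if result == 0: return f, quotient else: return None' of A
def pvFinishA (f : Int) (st : Int × List Int) : Option (Int × List Int) :=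
  if st.1 = 0 then some (f, st.2) else none

def e_factor (f : Int) (ex : List Int) : Option (Int × List Int) :=
  pvFinishA f ((List.range ex.length).foldl (pvStepA f ex) (0, []))

-- ===== PORT B =====
-- b_k = sum(ex[j] * f**(k-j) for j in range(k+1))
def pvCoef (f : Int) (ex : List Int) (k : Nat) : Int :=
  ((List.range (k + 1)).map (fun (j : Nat) => PySem.List.pyGetD ex (j : Int) 0 * f ^ (k - j))).sum

-- 'result = quotient[-1] * f if quotient else 0' and the final test of B
def pvFinishB (f : Int) (quotient : List Int) : Option (Int × List Int) :=
  if (if quotient = [] then 0 else PySem.List.pyGetD quotient (-1) 0 * f) = 0 then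
    some (f, quotient)
  else none

def e_factor_alt (f : Int) (ex : List Int) : Option (Int × List Int) :=
  pvFinishB f ((List.range ex.length).map (pvCoef f ex))

-- ===== PRECONDITION & SPEC =====
def Spec_e_factor (f : Int) (ex : List Int) (out : Option (Int × List Int)) : Prop := out = e_factor_alt f ex
instance (f : Int) (ex : List Int) (out : Option (Int × List Int)) : Decidable (Spec_e_factor f ex out) := by unfold Spec_e_factor; infer_instance

-- ===== CLAIM (what is proved, stated in full; the proofs are below) =====
def Claim_equal_e_factor : Prop := ∀ (f : Int) (ex : List Int), Dom_e_factor f ex → Spec_e_factor f ex (e_factor f ex)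

-- ===== LEMMAS AND PROOFS =====

lemma pvCoef_succ (f : Int) (ex : List Int) (k : Nat) :
    pvCoef f ex (k + 1) = pvCoef f ex k * f + ex.getD (k + 1) 0 := by
  unfold pvCoef
  rw [List.range_succ (n := k + 1), List.map_append, List.sum_append]
  have h1 : (List.range (k + 1)).map (fun (j : Nat) => PySem.List.pyGetD ex (j : Int) 0 * f ^ (k + 1 - j))
      = (List.range (k + 1)).map (fun (j : Nat) => PySem.List.pyGetD ex (j : Int) 0 * f ^ (k - j) * f) := by
    refine List.map_congr_left (fun j hj => ?_)
    have hjk : j ≤ k := Nat.lt_succ_iff.mp (List.mem_range.mp hj)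
    have h2 : k + 1 - j = (k - j) + 1 := by omega
    rw [h2, pow_succ, mul_assoc]
  rw [h1]
  simp [List.sum_map_mul_right]

lemma pv_getD_cast_succ (ex : List Int) (n : Nat) :
    PySem.List.pyGetD ex ((n : Int) + 1) 0 = ex.getD (n + 1) 0 := by
  have h : ((n : Int) + 1) = (((n + 1 : Nat)) : Int) := by push_cast; ring
  rw [h, PySem.List.pyGetD_natCast]

lemma pv_loop_eq (f : Int) (ex : List Int) (n : Nat) :
    (List.range (n + 1)).foldl (pvStepA f ex) (0, []) =
      (pvCoef f ex n * f, (List.range (n + 1)).map (pvCoef f ex)) := by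
  induction n with
  | zero =>
      simp [pvStepA, pvCoef, List.range_succ, PySem.List.pyGetD_zero, List.getD]
  | succ n ih =>
      rw [List.range_succ, List.foldl_append, ih]
      have hr : pvCoef f ex n * f + PySem.List.pyGetD ex ((n : Int) + 1) 0
          = pvCoef f ex (n + 1) := by
        rw [pvCoef_succ, pv_getD_cast_succ]
      simp only [List.foldl, pvStepA, if_neg (Nat.succ_ne_zero n)]
      rw [List.map_append]
      simp [hr]

lemma pv_last_coef (f : Int) (ex : List Int) (n : Nat) :
    PySem.List.pyGetD ((List.range (n + 1)).map (pvCoef f ex)) (-1) 0 = pvCoef f ex n := by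
  rw [List.range_succ, List.map_append]
  simp [PySem.List.pyGetD_neg_one_append_singleton]

-- ===== VERDICT (by name: the statement is the Claim_ definition above) =====
theorem e_factor_spec : Claim_equal_e_factor := by
  intro f ex _
  unfold Spec_e_factor e_factor e_factor_alt
  cases hex : ex.length with
  | zero => simp [pvFinishA, pvFinishB]
  | succ n =>
      rw [pv_loop_eq]
      have hne : (List.range (n + 1)).map (pvCoef f ex) ≠ [] := by
        simp [List.range_succ]
      unfold pvFinishA pvFinishB
      rw [if_neg hne, pv_last_coef]
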